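-- pv_equiv track=rewrite | github.com/MatteoFoucher/CodeIUT1 | python/TP/TP9 Ensembles et dictionnaires-20241119/3_mqrf/mqrf.py | quel_guichet_v2
-- ===== SOURCE A (Python) =====
-- def quel_guichet_v2(mqrf, guichet):
--     """Détermine le nom du guichet qui délivre le formulaire A-38
--     ainsi que le nombre de guichets visités
--
--     Args:
--         mqrf (dict): représente une maison qui rend fou
--         guichet (str): le nom du guichet de départ qui est le nom d'un guichet de la mqrf
--
--     Returns:
--         tuple: le nom du guichet qui finit par donner le formulaire A-38 et le nombre de
--         guichets visités pour y parvenir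
--     """
--     cpt = 0
--     while mqrf[guichet] != None:
--         guichet = mqrf[guichet]
--         cpt += 1
--         if cpt >= len(mqrf):
--             return None
--     return (guichet, cpt+1)
-- ===== SOURCE B (Python) =====
-- def quel_guichet_v2(mqrf, guichet):
--     """Floyd (lievre et tortue): detecte d'abord un eventuel cycle avec deux
--     pointeurs, puis recompte la chaine jusqu'au guichet terminal."""
--     if _cycle_devant(mqrf, guichet):
--         return None
--     cpt = 1
--     while mqrf[guichet] is not None:
--         guichet = mqrf[guichet]
--         cpt += 1
--     return (guichet, cpt)
--
--
-- def _cycle_devant(mqrf, guichet):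
--     """True ssi la marche depuis guichet tourne en rond (deux pointeurs de Floyd)."""
--     tortue, lievre = guichet, guichet
--     while mqrf[lievre] is not None:
--         lievre = mqrf[lievre]
--         if mqrf[lievre] is None:
--             return False
--         lievre = mqrf[lievre]
--         tortue = mqrf[tortue]
--         if tortue == lievre:
--             return True
--     return False
-- ===== Notes on version B (the rewrite author's own statement) =====
-- stated objective: alternative
-- what changed: B detects an unreachable terminal with Floyd's two-pointer (tortoise/hare) cycle detection and then recounts the chain in a second plain pass, instead of A's single counted walk that bails out once the step counter reaches len(mqrf).
-- outside the precondition, e.g. on quel_guichet_v2({'a': 'x'}, 'a'): A returns None, B raises KeyError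
import Mathlib
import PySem

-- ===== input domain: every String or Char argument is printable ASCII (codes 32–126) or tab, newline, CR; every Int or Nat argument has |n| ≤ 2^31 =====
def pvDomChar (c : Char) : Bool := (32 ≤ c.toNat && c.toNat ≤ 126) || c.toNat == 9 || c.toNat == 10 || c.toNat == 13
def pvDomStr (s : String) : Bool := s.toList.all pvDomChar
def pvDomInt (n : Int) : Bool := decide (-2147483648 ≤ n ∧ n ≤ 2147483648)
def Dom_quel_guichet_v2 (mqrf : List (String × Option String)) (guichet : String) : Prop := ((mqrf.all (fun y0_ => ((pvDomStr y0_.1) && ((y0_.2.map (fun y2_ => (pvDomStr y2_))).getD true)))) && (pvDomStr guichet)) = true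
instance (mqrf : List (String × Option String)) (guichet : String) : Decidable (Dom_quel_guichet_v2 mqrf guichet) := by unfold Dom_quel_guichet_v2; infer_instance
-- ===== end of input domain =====

-- B replaces A's counted walk (bail out at len(mqrf) steps) by Floyd's two-pointer cycle
-- detection followed by a second counting pass (alternative algorithm, not timed faster).

-- ===== PORT A =====
-- A's while loop: advance along the dict, count steps, bail out with None once cpt >= len(mqrf).
-- fuel only ensures termination: it is d.size + 1, one more than the loop can ever iterate (the cpt bound fires first).
def qgA_loop (d : PySem.Dict String (Option String)) (fuel : Nat) (guichet : String) (cpt : Int) : Option (String × Int) :=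
  match fuel with
  | 0 => none                         -- unreachable: the cpt bound fires before the fuel runs out
  | f + 1 =>
    match d.get? guichet with
    | none => none                    -- Python: KeyError on mqrf[guichet]; excluded by Pre_
    | some none => some (guichet, cpt + 1)
    | some (some g') =>
      if cpt + 1 ≥ (d.size : Int) then none
      else qgA_loop d f g' (cpt + 1)

def quel_guichet_v2 (mqrf : List (String × Option String)) (guichet : String) : Option (String × Int) :=
  qgA_loop (PySem.Dict.ofList mqrf) ((PySem.Dict.ofList mqrf).size + 1) guichet 0

-- ===== PORT B =====
-- B's helper _cycle_devant: Floyd's tortoise/hare loop; true = cycle ahead (return None).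
-- fuel only ensures termination: inside Pre_ the loop ends within d.size + 1 iterations.
def qgB_floyd (d : PySem.Dict String (Option String)) (fuel : Nat) (tortue lievre : String) : Bool :=
  match fuel with
  | 0 => true                         -- unreachable inside Pre_ unless the walk cycles (then None is correct)
  | f + 1 =>
    match d.get? lievre with
    | none => true                    -- Python: KeyError on mqrf[lievre]; excluded by Pre_
    | some none => false              -- while condition fails: no cycle, a terminal lies ahead
    | some (some l1) =>
      match d.get? l1 with
      | none => true                  -- Python: KeyError; excluded by Pre_
      | some none => false            -- 'return False': the hare reached the terminal
      | some (some l2) =>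
        match d.get? tortue with
        | none => true                -- Python: KeyError; excluded by Pre_
        | some none => true           -- unreachable inside Pre_: the tortoise trails the hare, which breaks first
        | some (some t1) =>
          if t1 == l2 then true       -- 'return True': the pointers met, the walk cycles
          else qgB_floyd d f t1 l2

-- B's second loop: plain counting walk to the terminal (no bound, no set).
def qgB_walk (d : PySem.Dict String (Option String)) (fuel : Nat) (guichet : String) (cpt : Int) : Option (String × Int) :=
  match fuel with
  | 0 => none                         -- unreachable inside Pre_ once qgB_floyd returned false
  | f + 1 =>
    match d.get? guichet with
    | none => none                    -- Python: KeyError; excluded by Pre_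
    | some none => some (guichet, cpt)
    | some (some g') => qgB_walk d f g' (cpt + 1)

def quel_guichet_v2_alt (mqrf : List (String × Option String)) (guichet : String) : Option (String × Int) :=
  if qgB_floyd (PySem.Dict.ofList mqrf) ((PySem.Dict.ofList mqrf).size + 1) guichet guichet then
    none
  else qgB_walk (PySem.Dict.ofList mqrf) ((PySem.Dict.ofList mqrf).size + 1) guichet 1

-- ===== PRECONDITION & SPEC =====
-- Pre_ is the natural domain of a "maison qui rend fou": the start guichet is a guichet of the
-- dict and every redirection target is again a guichet of the dict.  Outside it A either raises
-- KeyError, or (when a chain walks through every guichet and then points at a non-guichet) A's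
-- iteration bound accidentally returns None one lookup before B's KeyError — B raises there, so
-- those inputs are excluded rather than stated as a difference.
def Pre_quel_guichet_v2 (mqrf : List (String × Option String)) (guichet : String) : Prop :=
  (∃ p ∈ mqrf, p.1 = guichet) ∧
  ∀ p ∈ mqrf, ∀ s, p.2 = some s → ∃ q ∈ mqrf, q.1 = s
instance (mqrf : List (String × Option String)) (guichet : String) : Decidable (Pre_quel_guichet_v2 mqrf guichet) := by unfold Pre_quel_guichet_v2; infer_instance

def pvWitness_quel_guichet_v2 : (List (String × Option String)) × String :=
  ([("a", some "b"), ("b", some "c"), ("c", none)], "a")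

def Spec_quel_guichet_v2 (mqrf : List (String × Option String)) (guichet : String) (out : Option (String × Int)) : Prop := out = quel_guichet_v2_alt mqrf guichet
instance (mqrf : List (String × Option String)) (guichet : String) (out : Option (String × Int)) : Decidable (Spec_quel_guichet_v2 mqrf guichet out) := by unfold Spec_quel_guichet_v2; infer_instance

-- ===== CLAIM (what is proved, stated in full; the proofs are below) =====
def Claim_equal_quel_guichet_v2 : Prop := ∀ (mqrf : List (String × Option String)) (guichet : String), Dom_quel_guichet_v2 mqrf guichet → Pre_quel_guichet_v2 mqrf guichet → Spec_quel_guichet_v2 mqrf guichet (quel_guichet_v2 mqrf guichet)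

-- ===== LEMMAS AND PROOFS =====

-- `qgNth d g k`: the guichet reached after k successful advances from g (none once the walk stops).
def qgNth (d : PySem.Dict String (Option String)) (g : String) : Nat → Option String
  | 0 => some g
  | k + 1 =>
    match qgNth d g k with
    | none => none
    | some x =>
      match d.get? x with
      | some (some y) => some y
      | _ => none

theorem qgNth_succ_eq (d : PySem.Dict String (Option String)) (g : String) (k : Nat) :
    qgNth d g (k + 1) =
      (match qgNth d g k with
       | none => none
       | some x =>
         match d.get? x with
         | some (some y) => some y
         | _ => none) := rfl

theorem qgNth_shift (d : PySem.Dict String (Option String)) (g g' : String)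
    (h : d.get? g = some (some g')) : ∀ k, qgNth d g (k + 1) = qgNth d g' k := by
  intro k
  induction k with
  | zero => simp [qgNth, h]
  | succ k ih => rw [qgNth_succ_eq d g (k + 1), ih]; rfl

theorem qgNth_succ_none (d : PySem.Dict String (Option String)) (g : String) (k : Nat)
    (h : qgNth d g k = none) : qgNth d g (k + 1) = none := by
  simp [qgNth_succ_eq, h]

-- Inversion: a defined position k+1 comes from a defined, stepful position k.
theorem qgNth_succ_inv (d : PySem.Dict String (Option String)) (g : String) (k : Nat)
    (x : String) (h : qgNth d g (k + 1) = some x) :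
    ∃ w, qgNth d g k = some w ∧ d.get? w = some (some x) := by
  rcases hw : qgNth d g k with _ | w
  · simp [qgNth_succ_eq, hw] at h
  · rcases hg2 : d.get? w with _ | v
    · simp [qgNth_succ_eq, hw, hg2] at h
    · rcases v with _ | y
      · simp [qgNth_succ_eq, hw, hg2] at h
      · have hyx : y = x := by
          rw [qgNth_succ_eq, hw] at h
          simpa [hg2] using h
        exact ⟨w, by simp, by rw [← hyx]; exact hg2⟩

theorem qgNth_succ_of (d : PySem.Dict String (Option String)) (g : String) (k : Nat)
    (x y : String) (hx : qgNth d g k = some x) (hy : d.get? x = some (some y)) :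
    qgNth d g (k + 1) = some y := by
  rw [qgNth_succ_eq, hx]
  simp [hy]

theorem qgNth_some_of_le (d : PySem.Dict String (Option String)) (g : String) :
    ∀ k j, j ≤ k → qgNth d g k ≠ none → qgNth d g j ≠ none := by
  intro k
  induction k with
  | zero =>
    intro j hj h
    have : j = 0 := by omega
    exact this ▸ h
  | succ k ih =>
    intro j hj h
    rcases Nat.lt_or_ge j (k + 1) with hlt | hge
    · have hk : qgNth d g k ≠ none := fun hn => h (qgNth_succ_none d g k hn)
      exact ih j (by omega) hk
    · have : j = k + 1 := by omega
      exact this ▸ h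

theorem qgNth_mem_keys (d : PySem.Dict String (Option String)) (g : String)
    (hg : g ∈ d.keys) (hcl : ∀ x y, d.get? x = some (some y) → y ∈ d.keys) :
    ∀ k x, qgNth d g k = some x → x ∈ d.keys := by
  intro k
  induction k with
  | zero => intro x hx; simp [qgNth] at hx; exact hx ▸ hg
  | succ k ih =>
    intro x hx
    obtain ⟨w, hw, hwx⟩ := qgNth_succ_inv d g k x hx
    exact hcl w x hwx

-- Periodicity: a repeated value makes the walk repeat forever.
theorem qgNth_periodic (d : PySem.Dict String (Option String)) (g : String) (i j : Nat)
    (h : qgNth d g i = qgNth d g j) : ∀ m, qgNth d g (i + m) = qgNth d g (j + m) := by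
  intro m
  induction m with
  | zero => simpa using h
  | succ m ih =>
    show qgNth d g ((i + m) + 1) = qgNth d g ((j + m) + 1)
    rw [qgNth_succ_eq, qgNth_succ_eq, ih]

-- Injectivity of the walk before the terminal: with the terminal (minimally) at K,
-- two equal positions i < j ≤ K are impossible.
theorem qgNth_inj (d : PySem.Dict String (Option String)) (g : String) (K : Nat) (t : String)
    (hK : qgNth d g K = some t) (ht : d.get? t = some none)
    (hmin : ∀ j < K, ∀ x, qgNth d g j = some x → ∃ y, d.get? x = some (some y))
    (i j : Nat) (hij : i < j) (hjK : j ≤ K) (heq : qgNth d g i = qgNth d g j) : False := by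
  have hper := qgNth_periodic d g i j heq (K - j)
  have hiK : i + (K - j) < K := by omega
  have hjK' : j + (K - j) = K := by omega
  rw [hjK', hK] at hper
  obtain ⟨y, hy⟩ := hmin (i + (K - j)) hiK t hper
  rw [ht] at hy; cases hy

-- A walk with K+1 distinct positions inside the keys forces K+1 ≤ number of keys.
theorem qgNth_card (d : PySem.Dict String (Option String)) (g : String) (K : Nat) (t : String)
    (hg : g ∈ d.keys) (hcl : ∀ x y, d.get? x = some (some y) → y ∈ d.keys)
    (hnd : d.keys.Nodup)
    (hK : qgNth d g K = some t) (ht : d.get? t = some none)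
    (hmin : ∀ j < K, ∀ x, qgNth d g j = some x → ∃ y, d.get? x = some (some y)) :
    K + 1 ≤ d.keys.length := by
  have hsome : ∀ j : Nat, j ≤ K → qgNth d g j ≠ none := by
    intro j hj
    exact qgNth_some_of_le d g K j hj (by rw [hK]; simp)
  have hmaps : ∀ j : Fin (K + 1), (qgNth d g j).getD g ∈ d.keys.toFinset := by
    intro j
    rcases h : qgNth d g j with _ | x
    · exact absurd h (hsome j (by omega))
    · rw [List.mem_toFinset]
      simpa using qgNth_mem_keys d g hg hcl j x h
  have hinj : Function.Injective (fun j : Fin (K + 1) => (qgNth d g j).getD g) := by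
    intro i j hij
    rcases hi : qgNth d g i with _ | xi
    · exact absurd hi (hsome i (by omega))
    rcases hj : qgNth d g j with _ | xj
    · exact absurd hj (hsome j (by omega))
    simp only [hi, hj, Option.getD_some] at hij
    by_contra hne
    rcases Nat.lt_or_ge i.val j.val with hlt | hge
    · exact qgNth_inj d g K t hK ht hmin i j hlt (by omega) (by rw [hi, hj, hij])
    · have hlt : j.val < i.val := by
        rcases Nat.lt_or_ge j.val i.val with h | h
        · exact h
        · exact absurd (Fin.ext (by omega)) hne
      exact qgNth_inj d g K t hK ht hmin j i hlt (by omega) (by rw [hi, hj, hij])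
  have hcard := Finset.card_le_card_of_injOn (s := (Finset.univ : Finset (Fin (K + 1))))
    (t := d.keys.toFinset) (fun j : Fin (K + 1) => (qgNth d g j).getD g)
    (fun j _ => hmaps j) (fun a _ b _ h => hinj h)
  simpa [List.toFinset_card_of_nodup hnd, Finset.card_univ] using hcard

-- A's loop when the terminal sits (minimally) K advances ahead and the bound never fires.
theorem qgA_loop_term (d : PySem.Dict String (Option String)) :
    ∀ (K : Nat) (g t : String) (cpt : Int) (fuel : Nat),
      qgNth d g K = some t → d.get? t = some none →
      (∀ j < K, ∀ x, qgNth d g j = some x → ∃ y, d.get? x = some (some y)) →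
      K + 1 ≤ fuel → cpt + K < (d.size : Int) →
      qgA_loop d fuel g cpt = some (t, cpt + K + 1) := by
  intro K
  induction K with
  | zero =>
    intro g t cpt fuel hK ht _ hfuel _
    simp [qgNth] at hK
    obtain ⟨f, rfl⟩ : ∃ f, fuel = f + 1 := ⟨fuel - 1, by omega⟩
    subst hK
    simp [qgA_loop, ht]
  | succ K ih =>
    intro g t cpt fuel hK ht hmin hfuel hbound
    obtain ⟨y, hy⟩ := hmin 0 (by omega) g (by simp [qgNth])
    obtain ⟨f, rfl⟩ : ∃ f, fuel = f + 1 := ⟨fuel - 1, by omega⟩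
    have hK' : qgNth d y K = some t := by rw [← qgNth_shift d g y hy K]; exact hK
    have hmin' : ∀ j < K, ∀ x, qgNth d y j = some x → ∃ z, d.get? x = some (some z) := by
      intro j hj x hx
      exact hmin (j + 1) (by omega) x (by rw [qgNth_shift d g y hy j]; exact hx)
    have hrec := ih y t (cpt + 1) f hK' ht hmin' (by omega) (by push_cast at hbound ⊢; omega)
    simp only [qgA_loop, hy]
    rw [if_neg (by push_cast at hbound ⊢; omega), hrec]
    congr 2
    omega

-- B's counting walk under the same hypotheses.
theorem qgB_walk_term (d : PySem.Dict String (Option String)) :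
    ∀ (K : Nat) (g t : String) (cpt : Int) (fuel : Nat),
      qgNth d g K = some t → d.get? t = some none →
      (∀ j < K, ∀ x, qgNth d g j = some x → ∃ y, d.get? x = some (some y)) →
      K + 1 ≤ fuel →
      qgB_walk d fuel g cpt = some (t, cpt + K) := by
  intro K
  induction K with
  | zero =>
    intro g t cpt fuel hK ht _ hfuel
    simp [qgNth] at hK
    obtain ⟨f, rfl⟩ : ∃ f, fuel = f + 1 := ⟨fuel - 1, by omega⟩
    subst hK
    simp [qgB_walk, ht]
  | succ K ih =>
    intro g t cpt fuel hK ht hmin hfuel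
    obtain ⟨y, hy⟩ := hmin 0 (by omega) g (by simp [qgNth])
    obtain ⟨f, rfl⟩ : ∃ f, fuel = f + 1 := ⟨fuel - 1, by omega⟩
    have hK' : qgNth d y K = some t := by rw [← qgNth_shift d g y hy K]; exact hK
    have hmin' : ∀ j < K, ∀ x, qgNth d y j = some x → ∃ z, d.get? x = some (some z) := by
      intro j hj x hx
      exact hmin (j + 1) (by omega) x (by rw [qgNth_shift d g y hy j]; exact hx)
    rw [show qgB_walk d (f+1) g cpt = qgB_walk d f y (cpt+1) by simp [qgB_walk, hy],
        ih y t (cpt + 1) f hK' ht hmin' (by omega)]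
    congr 2
    omega

-- Floyd's loop breaks with `false` when a terminal lies ahead: the hare reaches it first,
-- and before that the two pointers sit at distinct walk positions, so they never meet.
theorem qgB_floyd_term (d : PySem.Dict String (Option String)) (g : String) (K : Nat) (t : String)
    (hK : qgNth d g K = some t) (ht : d.get? t = some none)
    (hmin : ∀ j < K, ∀ x, qgNth d g j = some x → ∃ y, d.get? x = some (some y)) :
    ∀ (fuel tp hp : Nat) (tort hare : String),
      qgNth d g tp = some tort → qgNth d g hp = some hare → hp = 2 * tp → hp ≤ K →
      K - hp + 1 ≤ fuel →
      qgB_floyd d fuel tort hare = false := by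
  intro fuel
  induction fuel with
  | zero => intro tp hp tort hare _ _ _ _ hf; omega
  | succ f ih =>
    intro tp hp tort hare htort hhare htw hhK hf
    by_cases hpK : hp = K
    · have : hare = t := by rw [hpK, hK] at hhare; exact (Option.some_injective _ hhare).symm
      subst this
      simp [qgB_floyd, ht]
    · have hhpK : hp < K := by omega
      obtain ⟨l1, hl1⟩ := hmin hp hhpK hare hhare
      have hnth1 : qgNth d g (hp + 1) = some l1 :=
        qgNth_succ_of d g hp hare l1 hhare hl1
      by_cases hp1K : hp + 1 = K
      · have : l1 = t := by rw [hp1K, hK] at hnth1; exact (Option.some_injective _ hnth1).symm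
        subst this
        simp [qgB_floyd, hl1, ht]
      · have hhp1K : hp + 1 < K := by omega
        obtain ⟨l2, hl2⟩ := hmin (hp + 1) hhp1K l1 hnth1
        have hnth2 : qgNth d g (hp + 2) = some l2 :=
          qgNth_succ_of d g (hp + 1) l1 l2 hnth1 hl2
        obtain ⟨t1, ht1⟩ := hmin tp (by omega) tort htort
        have hntht : qgNth d g (tp + 1) = some t1 :=
          qgNth_succ_of d g tp tort t1 htort ht1
        have hne : t1 ≠ l2 := by
          intro he
          exact qgNth_inj d g K t hK ht hmin (tp + 1) (hp + 2) (by omega) (by omega)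
            (by rw [hntht, hnth2, he])
        simp only [qgB_floyd, hl1, hl2, ht1]
        rw [if_neg (by simpa using hne)]
        exact ih (tp + 1) (hp + 2) t1 l2 hntht hnth2 (by omega) (by omega) (by omega)

-- When the walk never reaches a terminal, every branch of Floyd's loop yields `true`.
theorem qgB_floyd_cyc (d : PySem.Dict String (Option String)) (g : String)
    (hc : ∀ j, ∃ x y, qgNth d g j = some x ∧ d.get? x = some (some y)) :
    ∀ (fuel tp hp : Nat) (tort hare : String),
      qgNth d g tp = some tort → qgNth d g hp = some hare →
      qgB_floyd d fuel tort hare = true := by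
  intro fuel
  induction fuel with
  | zero => intro _ _ _ _ _ _; rfl
  | succ f ih =>
    intro tp hp tort hare htort hhare
    obtain ⟨x, l1, hx, hl1⟩ := hc hp
    rw [hhare] at hx
    cases (Option.some_injective _ hx)
    have hnth1 : qgNth d g (hp + 1) = some l1 := qgNth_succ_of d g hp hare l1 hhare hl1
    obtain ⟨x2, l2, hx2, hl2⟩ := hc (hp + 1)
    rw [hnth1] at hx2
    cases (Option.some_injective _ hx2)
    have hnth2 : qgNth d g (hp + 2) = some l2 := qgNth_succ_of d g (hp + 1) l1 l2 hnth1 hl2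
    obtain ⟨xt, t1, hxt, ht1⟩ := hc tp
    rw [htort] at hxt
    cases (Option.some_injective _ hxt)
    have hntht : qgNth d g (tp + 1) = some t1 := qgNth_succ_of d g tp tort t1 htort ht1
    simp only [qgB_floyd, hl1, hl2, ht1]
    split
    · rfl
    · exact ih (tp + 1) (hp + 2) t1 l2 hntht hnth2

-- When the walk never reaches a terminal, A's counter bound fires and the loop yields none.
theorem qgA_loop_cyc (d : PySem.Dict String (Option String)) :
    ∀ (fuel : Nat) (g : String) (cpt : Int),
      (∀ j, ∃ x y, qgNth d g j = some x ∧ d.get? x = some (some y)) →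
      (d.size : Int) ≤ cpt + fuel →
      qgA_loop d fuel g cpt = none := by
  intro fuel
  induction fuel with
  | zero => intro g cpt _ _; rfl
  | succ f ih =>
    intro g cpt hc hb
    obtain ⟨x, y, hx, hy⟩ := hc 0
    simp [qgNth] at hx
    subst hx
    simp only [qgA_loop, hy]
    split
    · rfl
    · refine ih y (cpt + 1) ?_ (by push_cast at hb ⊢; omega)
      intro j
      obtain ⟨a, b, ha, hb'⟩ := hc (j + 1)
      exact ⟨a, b, by rw [← qgNth_shift d g y hy j]; exact ha, hb'⟩

-- Bridging Pre_ to facts about the built dict.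
theorem mem_keys_ofList (mqrf : List (String × Option String)) (k : String) :
    k ∈ (PySem.Dict.ofList mqrf).keys ↔ ∃ p ∈ mqrf, p.1 = k := by
  have h := PySem.Dict.keys_foldl_insert_key (ν := Option String) mqrf Prod.fst
    (fun _ x => x.2) PySem.Dict.empty
  have hofl : (PySem.Dict.ofList mqrf).keys = PySem.Set.update PySem.Dict.empty.keys (mqrf.map Prod.fst) := h
  rw [hofl]
  have : PySem.Set.update (PySem.Dict.empty.keys (κ := String) (ν := Option String)) (mqrf.map Prod.fst)
      = PySem.Set.ofList (mqrf.map Prod.fst) := rfl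
  rw [this, PySem.Set.mem_ofList]
  simp [List.mem_map, eq_comm]

theorem items_update_subset {d : PySem.Dict String (Option String)}
    {l : List (String × Option String)} :
    ∀ q ∈ (d.update l).items, q ∈ d.items ∨ q ∈ l := by
  induction l generalizing d with
  | nil => intro q hq; exact Or.inl hq
  | cons a t ih =>
    intro q hq
    have := ih (d := d.insert a.1 a.2) q hq
    rcases this with h | h
    · rcases (PySem.Dict.mem_items_insert d a.1 a.2 q).mp h with h | h
      · exact Or.inr (by simp [h])
      · exact Or.inl h.1
    · exact Or.inr (by simp [h])

theorem ofList_closure (mqrf : List (String × Option String))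
    (hcl : ∀ p ∈ mqrf, ∀ s, p.2 = some s → ∃ q ∈ mqrf, q.1 = s) :
    ∀ x y, (PySem.Dict.ofList mqrf).get? x = some (some y) → y ∈ (PySem.Dict.ofList mqrf).keys := by
  intro x y hget
  have hnd := PySem.Dict.nodup_keys_ofList (ν := Option String) mqrf
  have hmem := (PySem.Dict.get?_eq_some_iff_mem_items _ x (some y) hnd).mp hget
  have : (x, some y) ∈ mqrf := by
    rcases items_update_subset (d := PySem.Dict.empty) (l := mqrf) _ hmem with h | h
    · simp [PySem.Dict.empty] at h
    · exact h
  obtain ⟨q, hq, hq1⟩ := hcl (x, some y) this y rfl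
  exact (mem_keys_ofList mqrf y).mpr ⟨q, hq, hq1⟩

-- Under Pre_, when no terminal is ever reached the walk is total and always stepful.
theorem qgNth_total_cyc (d : PySem.Dict String (Option String)) (g : String)
    (hg : g ∈ d.keys) (hcl : ∀ x y, d.get? x = some (some y) → y ∈ d.keys)
    (hno : ¬ ∃ j x, qgNth d g j = some x ∧ d.get? x = some none) :
    ∀ j, ∃ x y, qgNth d g j = some x ∧ d.get? x = some (some y) := by
  intro j
  induction j with
  | zero =>
    have hx : qgNth d g 0 = some g := rfl
    rcases hget : d.get? g with _ | v
    · exact absurd ((PySem.Dict.get?_eq_none_iff_not_mem_keys d g).mp hget) (by simp [hg])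
    · rcases v with _ | y
      · exact absurd ⟨0, g, hx, by simpa using hget⟩ hno
      · exact ⟨g, y, hx, by simpa using hget⟩
  | succ j ih =>
    obtain ⟨x, y, hx, hy⟩ := ih
    have hx' : qgNth d g (j + 1) = some y := qgNth_succ_of d g j x y hx hy
    have hyk : y ∈ d.keys := hcl x y hy
    rcases hget : d.get? y with _ | v
    · exact absurd ((PySem.Dict.get?_eq_none_iff_not_mem_keys d y).mp hget) (by simp [hyk])
    · rcases v with _ | z
      · exact absurd ⟨j + 1, y, hx', by simpa using hget⟩ hno
      · exact ⟨y, z, hx', by simpa using hget⟩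

-- ===== VERDICT (by name: the statement is the Claim_ definition above) =====
theorem quel_guichet_v2_spec : Claim_equal_quel_guichet_v2 := by
  intro mqrf guichet _ hpre
  obtain ⟨hstart, hclosed⟩ := hpre
  unfold Spec_quel_guichet_v2 quel_guichet_v2 quel_guichet_v2_alt
  set d := PySem.Dict.ofList mqrf with hd
  have hnd : d.keys.Nodup := PySem.Dict.nodup_keys_ofList mqrf
  have hsize : d.size = d.keys.length := by simp [PySem.Dict.size, PySem.Dict.keys]
  have hg : guichet ∈ d.keys := (mem_keys_ofList mqrf guichet).mpr hstart
  have hcl := ofList_closure mqrf hclosed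
  by_cases hterm : ∃ j x, qgNth d guichet j = some x ∧ d.get? x = some none
  · -- a terminal is reachable: take the first stopping index K
    have hdec : DecidablePred (fun j => ∃ x, qgNth d guichet j = some x ∧ d.get? x = some none) := by
      intro j; infer_instance
    obtain ⟨j0, hj0⟩ := hterm
    have hEx : ∃ j, ∃ x, qgNth d guichet j = some x ∧ d.get? x = some none := ⟨j0, hj0⟩
    set K := Nat.find hEx with hKdef
    obtain ⟨t, hKt, ht⟩ := Nat.find_spec hEx
    have hmin : ∀ j < K, ∀ x, qgNth d guichet j = some x → ∃ y, d.get? x = some (some y) := by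
      intro j hj x hx
      have hnot := Nat.find_min hEx hj
      rcases hget : d.get? x with _ | v
      · exact absurd ((PySem.Dict.get?_eq_none_iff_not_mem_keys d x).mp hget)
          (by simp [qgNth_mem_keys d guichet hg hcl j x hx])
      · rcases v with _ | y
        · exact absurd ⟨x, hx, hget⟩ hnot
        · exact ⟨y, rfl⟩
    have hcard : K + 1 ≤ d.keys.length :=
      qgNth_card d guichet K t hg hcl hnd hKt ht hmin
    have hA : qgA_loop d (d.size + 1) guichet 0 = some (t, 0 + (K : Int) + 1) :=
      qgA_loop_term d K guichet t 0 (d.size + 1) hKt ht hmin (by omega) (by rw [hsize]; omega)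
    have hF : qgB_floyd d (d.size + 1) guichet guichet = false :=
      qgB_floyd_term d guichet K t hKt ht hmin (d.size + 1) 0 0 guichet guichet rfl rfl (by omega)
        (by omega) (by rw [hsize]; omega)
    have hW : qgB_walk d (d.size + 1) guichet 1 = some (t, 1 + (K : Int)) :=
      qgB_walk_term d K guichet t 1 (d.size + 1) hKt ht hmin (by omega)
    rw [hA, hF]
    simp only [if_false, Bool.false_eq_true, hW]
    congr 2
    omega
  · -- no terminal reachable: A's bound fires (none) and Floyd's pointers report a cycle (none)
    have hc := qgNth_total_cyc d guichet hg hcl hterm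
    have hA : qgA_loop d (d.size + 1) guichet 0 = none :=
      qgA_loop_cyc d (d.size + 1) guichet 0 hc (by push_cast; omega)
    have hF : qgB_floyd d (d.size + 1) guichet guichet = true :=
      qgB_floyd_cyc d guichet hc (d.size + 1) 0 0 guichet guichet rfl rfl
    rw [hA, hF]
    simp
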